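-- pv_equiv track=rewrite | github.com/Ankeraout/advent-of-code | 2023/14/solver.py | roll_rocks
-- ===== SOURCE A (Python) =====
-- from copy import deepcopy
--
-- def roll_rocks(data: list[list[str]], direction: str = "N") -> list[str]:
--     return_value = deepcopy(data)
--
--     if direction == "N":
--         for last_row_to_check in range(len(return_value) - 1, 0, -1):
--             for row in range(0, last_row_to_check):
--                 for column in range(0, len(return_value[0])):
--                     if return_value[row][column] == "." and return_value[row + 1][column] == "O":
--                         return_value[row][column], return_value[row + 1][column] = return_value[row + 1][column], return_value[row][column]
--
--     elif direction == "S":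
--         for last_row_to_check in range(len(return_value) - 1):
--             for row in range(len(return_value) - 1, last_row_to_check, -1):
--                 for column in range(0, len(return_value[0])):
--                     if return_value[row - 1][column] == "O" and return_value[row][column] == ".":
--                         return_value[row][column], return_value[row - 1][column] = return_value[row - 1][column], return_value[row][column]
--
--     elif direction == "W":
--         for last_column_to_check in range(len(data[0]) - 1, 0, -1):
--             for column in range(0, last_column_to_check):
--                 for row in range(0, len(return_value)):
--                     if return_value[row][column] == "." and return_value[row][column + 1] == "O":
--                         return_value[row][column], return_value[row][column + 1] = return_value[row][column + 1], return_value[row][column]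
--
--     elif direction == "E":
--         for last_column_to_check in range(len(return_value[0]) - 1):
--             for column in range(len(return_value[0]) - 1, last_column_to_check, -1):
--                 for row in range(0, len(return_value)):
--                     if return_value[row][column - 1] == "O" and return_value[row][column] == ".":
--                         return_value[row][column], return_value[row][column - 1] = return_value[row][column - 1], return_value[row][column]
--
--     return return_value
-- ===== SOURCE B (Python) =====
-- def _compact(line):
--     # one pass: count 'O's and '.'s of the current free run, flush at barriers
--     out = []
--     run_o = run_dot = 0
--     for cell in line:
--         if cell == "O":
--             run_o += 1
--         elif cell == ".":
--             run_dot += 1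
--         else:
--             out.extend(["O"] * run_o + ["."] * run_dot)
--             out.append(cell)
--             run_o = run_dot = 0
--     out.extend(["O"] * run_o + ["."] * run_dot)
--     return out
--
--
-- def roll_rocks(data: list[list[str]], direction: str = "N") -> list[str]:
--     if direction == "W":
--         return [_compact(row) for row in data]
--     if direction == "E":
--         return [_compact(row[::-1])[::-1] for row in data]
--     if direction == "N" or direction == "S":
--         if not data or not data[0]:
--             return [list(row) for row in data]
--         cols = [list(c) for c in zip(*data)]
--         if direction == "N":
--             cols = [_compact(c) for c in cols]
--         else:
--             cols = [_compact(c[::-1])[::-1] for c in cols]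
--         return [list(r) for r in zip(*cols)]
--     return [list(row) for row in data]
-- ===== Notes on version B (the rewrite author's own statement) =====
-- stated objective: faster
-- what changed: Replaces A's repeated bubbling sweeps of adjacent swaps (a shrinking-bound bubble sort per line) with a single counting-compaction pass per row/column (zip-transpose for N/S) that flushes each run of rocks at the barriers.
-- outside the precondition, e.g. on roll_rocks([['.'], ['O', '.']], 'N'): A returns [['O'], ['.', '.']], B returns [['O'], ['.']]; on roll_rocks([['x'], ['.', 'O']], 'W'): A returns [['x'], ['.', 'O']], B returns [['x'], ['O', '.']]; on roll_rocks([], 'W'): A raises IndexError, B returns []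
import Mathlib
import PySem

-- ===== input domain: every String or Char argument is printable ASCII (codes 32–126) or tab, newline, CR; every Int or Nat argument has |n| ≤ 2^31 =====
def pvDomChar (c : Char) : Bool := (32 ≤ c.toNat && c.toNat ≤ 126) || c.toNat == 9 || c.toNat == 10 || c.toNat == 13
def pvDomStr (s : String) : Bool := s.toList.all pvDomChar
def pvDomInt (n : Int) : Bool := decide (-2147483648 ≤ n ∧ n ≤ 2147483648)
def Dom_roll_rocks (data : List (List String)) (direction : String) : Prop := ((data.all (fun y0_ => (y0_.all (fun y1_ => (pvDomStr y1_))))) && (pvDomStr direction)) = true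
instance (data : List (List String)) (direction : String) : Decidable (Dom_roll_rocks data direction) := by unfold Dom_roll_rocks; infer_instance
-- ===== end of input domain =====

-- B replaces A's quadratic bubbling passes by a single compaction pass per line (counting rocks
-- between barriers); objective: faster. A copies its input and mutates only the copy, so return
-- values are the whole observable behaviour.

-- ===== PORT A =====
-- return_value[row][column] (read; loop indices are always ≥ 0)
def pyCell (g : List (List String)) (r c : Int) : String :=
  PySem.List.pyGetD (PySem.List.pyGetD g r []) c ""

-- return_value[row][column] = v (write; loop indices are always ≥ 0, so plain .toNat is exact)
def setCell (g : List (List String)) (r c : Int) (v : String) : List (List String) :=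
  g.set r.toNat ((PySem.List.pyGetD g r []).set c.toNat v)

-- body of the N-branch inner `if`: the tuple swap reads both old values, then assigns them
def stepN (g : List (List String)) (row col : Int) : List (List String) :=
  if pyCell g row col = "." ∧ pyCell g (row + 1) col = "O" then
    setCell (setCell g row col (pyCell g (row + 1) col)) (row + 1) col (pyCell g row col)
  else g

def stepS (g : List (List String)) (row col : Int) : List (List String) :=
  if pyCell g (row - 1) col = "O" ∧ pyCell g row col = "." then
    setCell (setCell g row col (pyCell g (row - 1) col)) (row - 1) col (pyCell g row col)
  else g

def stepW (g : List (List String)) (row col : Int) : List (List String) :=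
  if pyCell g row col = "." ∧ pyCell g row (col + 1) = "O" then
    setCell (setCell g row col (pyCell g row (col + 1))) row (col + 1) (pyCell g row col)
  else g

def stepE (g : List (List String)) (row col : Int) : List (List String) :=
  if pyCell g row (col - 1) = "O" ∧ pyCell g row col = "." then
    setCell (setCell g row col (pyCell g row (col - 1))) row (col - 1) (pyCell g row col)
  else g

-- literal transliteration of A; `return_value = deepcopy(data)` is the immutable value `data`;
-- len(return_value) and len(return_value[0]) are invariant through the loops, hoisted as n, w
def roll_rocks (data : List (List String)) (direction : String) : List (List String) :=
  let n : Int := data.length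
  let w : Int := (data.headD []).length
  if direction = "N" then
    (PySem.List.pyRange (n - 1) 0 (-1)).foldl (fun rv last =>
      (PySem.List.pyRange 0 last 1).foldl (fun rv row =>
        (PySem.List.pyRange 0 w 1).foldl (fun rv col => stepN rv row col) rv) rv) data
  else if direction = "S" then
    (PySem.List.pyRange 0 (n - 1) 1).foldl (fun rv last =>
      (PySem.List.pyRange (n - 1) last (-1)).foldl (fun rv row =>
        (PySem.List.pyRange 0 w 1).foldl (fun rv col => stepS rv row col) rv) rv) data
  else if direction = "W" then
    (PySem.List.pyRange (w - 1) 0 (-1)).foldl (fun rv last =>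
      (PySem.List.pyRange 0 last 1).foldl (fun rv col =>
        (PySem.List.pyRange 0 n 1).foldl (fun rv row => stepW rv row col) rv) rv) data
  else if direction = "E" then
    (PySem.List.pyRange 0 (w - 1) 1).foldl (fun rv last =>
      (PySem.List.pyRange (w - 1) last (-1)).foldl (fun rv col =>
        (PySem.List.pyRange 0 n 1).foldl (fun rv row => stepE rv row col) rv) rv) data
  else data

-- ===== PORT B =====
-- one pass over the line: count "O"s and "."s of the current free run, flush runs at barriers
def compactB (line : List String) : List String :=
  let st := line.foldl (fun (st : List String × Nat × Nat) cell =>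
    if cell = "O" then (st.1, st.2.1 + 1, st.2.2)
    else if cell = "." then (st.1, st.2.1, st.2.2 + 1)
    else (st.1 ++ (List.replicate st.2.1 "O" ++ List.replicate st.2.2 ".") ++ [cell], 0, 0))
    ([], 0, 0)
  st.1 ++ (List.replicate st.2.1 "O" ++ List.replicate st.2.2 ".")

-- zip(*ls): truncates to the shortest row (rows are equal length wherever B uses it)
def pyMinLen (ls : List (List String)) : Nat :=
  match ls with
  | [] => 0
  | x :: xs => xs.foldl (fun m l => min m l.length) x.length

def pyZipStar (ls : List (List String)) : List (List String) :=
  (List.range (pyMinLen ls)).map (fun r => ls.map (fun l => l.getD r ""))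

def roll_rocks_alt (data : List (List String)) (direction : String) : List (List String) :=
  if direction = "W" then data.map compactB
  else if direction = "E" then data.map (fun row => (compactB row.reverse).reverse)
  else if direction = "N" ∨ direction = "S" then
    if data = [] ∨ data.headD [] = [] then data
    else
      let cols := pyZipStar data
      let cols2 := if direction = "N" then cols.map compactB
                   else cols.map (fun c => (compactB c.reverse).reverse)
      pyZipStar cols2
  else data

-- ===== PRECONDITION & SPEC =====
-- Pre_ restricts the four rolling directions to the function's natural domain, rectangular
-- grids (nonempty for "W"/"E"): on ragged grids A raises IndexError or silently processes only
-- the first len(data[0]) columns of each row, and for "W"/"E" on [] it raises IndexError.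
-- Any other direction (and "N"/"S" with an empty first row) moves nothing, so nothing is required.
def Pre_roll_rocks (data : List (List String)) (direction : String) : Prop :=
  ((direction = "N" ∨ direction = "S") →
    data.headD [] = [] ∨ ∀ row ∈ data, row.length = (data.headD []).length) ∧
  ((direction = "W" ∨ direction = "E") →
    data ≠ [] ∧ ∀ row ∈ data, row.length = (data.headD []).length)

instance (data : List (List String)) (direction : String) : Decidable (Pre_roll_rocks data direction) := by
  unfold Pre_roll_rocks; infer_instance

def pvWitness_roll_rocks : List (List String) × String :=
  ([[".", "O", "#"], ["O", ".", "O"]], "N")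

def Spec_roll_rocks (data : List (List String)) (direction : String) (out : List (List String)) : Prop := out = roll_rocks_alt data direction
instance (data : List (List String)) (direction : String) (out : List (List String)) : Decidable (Spec_roll_rocks data direction out) := by unfold Spec_roll_rocks; infer_instance

-- ===== CLAIM (what is proved, stated in full; the proofs are below) =====
def Claim_equal_roll_rocks : Prop := ∀ (data : List (List String)) (direction : String), Dom_roll_rocks data direction → Pre_roll_rocks data direction → Spec_roll_rocks data direction (roll_rocks data direction)

-- ===== LEMMAS AND PROOFS =====

-- ---------- generic list helpers ----------

lemma getD_set_self {α : Type} (l : List α) (i : Nat) (v d : α) :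
    (l.set i v).getD i d = if i < l.length then v else d := by
  induction l generalizing i with
  | nil => simp
  | cons x t ih =>
    cases i with
    | zero => simp
    | succ i => simpa using ih i

lemma getD_set_ne {α : Type} (l : List α) (i j : Nat) (v d : α) (h : i ≠ j) :
    (l.set i v).getD j d = l.getD j d := by
  rw [List.getD_eq_getElem?_getD, List.getD_eq_getElem?_getD, List.getElem?_set_ne h]

lemma set_getD_self {α : Type} (l : List α) (i : Nat) (d : α) :
    l.set i (l.getD i d) = l := by
  induction l generalizing i with
  | nil => simp
  | cons x t ih =>
    cases i with
    | zero => simp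
    | succ i => simpa using ih i

lemma set_oor {α : Type} (l : List α) (i : Nat) (v : α) (h : l.length ≤ i) :
    l.set i v = l := by
  induction l generalizing i with
  | nil => simp
  | cons x t ih =>
    cases i with
    | zero => simp at h
    | succ i => simp at h ⊢; exact ih i h

-- ---------- 1-D layer: a single line ----------

-- one conditional swap of A's forward shape at positions (r, r+1)
def step1 (r : Nat) (l : List String) : List String :=
  if l.getD r "" = "." ∧ l.getD (r + 1) "" = "O" then
    (l.set r (l.getD (r + 1) "")).set (r + 1) (l.getD r "")
  else l

-- one conditional swap of A's backward shape at positions (r-1, r)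
def bstep (r : Nat) (l : List String) : List String :=
  if l.getD (r - 1) "" = "O" ∧ l.getD r "" = "." then
    (l.set r (l.getD (r - 1) "")).set (r - 1) (l.getD r "")
  else l

-- one bounded forward bubble pass (pairs (c, c+1) for c < k)
def passRec : Nat → List String → List String
  | 0, l => l
  | _ + 1, [] => []
  | _ + 1, [x] => [x]
  | k + 1, x :: y :: t =>
    if x = "." ∧ y = "O" then "O" :: passRec k ("." :: t) else x :: passRec k (y :: t)

-- A's shrinking pass schedule: passes with bounds m, m-1, …, 1
def foldSched : Nat → List String → List String
  | 0, l => l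
  | m + 1, l => foldSched m (passRec (m + 1) l)

-- reference compaction, built from the right
def insDot : List String → List String
  | [] => ["."]
  | x :: t => if x = "O" then x :: insDot t else "." :: x :: t

def compactR : List String → List String
  | [] => []
  | x :: t => if x = "O" then "O" :: compactR t else if x = "." then insDot (compactR t) else x :: compactR t

def PureL (l : List String) : Prop := ∀ x ∈ l, x = "O" ∨ x = "."

lemma length_step1 (r : Nat) (l : List String) : (step1 r l).length = l.length := by
  unfold step1; split <;> simp

lemma passRec_nil (k : Nat) : passRec k [] = [] := by cases k <;> simp [passRec]

lemma passRec_singleton (k : Nat) (x : String) : passRec k [x] = [x] := by cases k <;> simp [passRec]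

lemma length_passRec (k : Nat) (l : List String) : (passRec k l).length = l.length := by
  induction k generalizing l with
  | zero => simp [passRec]
  | succ k ih =>
    match l with
    | [] => simp [passRec]
    | [x] => simp [passRec]
    | x :: y :: t => simp only [passRec]; split <;> simp [ih]

lemma foldSched_nil (m : Nat) : foldSched m [] = [] := by
  induction m with
  | zero => simp [foldSched]
  | succ m ih => simp [foldSched, passRec_nil, ih]

lemma step1_nil (r : Nat) : step1 r [] = [] := by simp [step1]

lemma step1_single (r : Nat) (x : String) : step1 r [x] = [x] := by
  unfold step1
  rcases r with _ | r <;> simp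

lemma step1_succ_cons (r : Nat) (x : String) (l : List String) :
    step1 (r + 1) (x :: l) = x :: step1 r l := by
  unfold step1; simp only [List.getD_cons_succ]
  split <;> simp [List.set]

lemma foldl_step1_shift (L : List Nat) (z : String) (t : List String) :
    L.foldl (fun l r => step1 (r + 1) l) (z :: t) = z :: L.foldl (fun l r => step1 r l) t := by
  induction L generalizing t with
  | nil => rfl
  | cons a L ih => simp only [List.foldl_cons, step1_succ_cons, ih]

lemma foldl_step1_range (k : Nat) (l : List String) :
    (List.range k).foldl (fun l r => step1 r l) l = passRec k l := by
  induction k generalizing l with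
  | zero => simp [passRec]
  | succ k ih =>
    rw [List.range_succ_eq_map]
    match l with
    | [] =>
      simp only [List.foldl_cons, step1_nil, List.foldl_map, passRec_nil]
      have : ∀ (L : List Nat), L.foldl (fun l r => step1 (r+1) l) ([] : List String) = [] := by
        intro L; induction L with
        | nil => rfl
        | cons a L ih2 => simp [step1_nil, ih2]
      exact this _
    | [x] =>
      simp only [List.foldl_cons, step1_single, List.foldl_map, passRec_singleton]
      have : ∀ (L : List Nat), L.foldl (fun l r => step1 (r+1) l) ([x] : List String) = [x] := by
        intro L; induction L with
        | nil => rfl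
        | cons a L ih2 => simp [step1_single, ih2]
      exact this _
    | x :: y :: t =>
      simp only [List.foldl_cons, List.foldl_map]
      have hz : step1 0 (x :: y :: t) =
          if x = "." ∧ y = "O" then y :: x :: t else x :: y :: t := by
        unfold step1; simp [List.set]
      rw [hz, passRec]
      split
      · rename_i h
        rw [h.1, h.2, foldl_step1_shift, ih]
      · rw [foldl_step1_shift, ih]

lemma passRec_succ_right (k : Nat) (l : List String) :
    passRec (k + 1) l = step1 k (passRec k l) := by
  rw [← foldl_step1_range, ← foldl_step1_range, List.range_succ, List.foldl_append]
  rfl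

lemma insDot_O (t : List String) : insDot ("O" :: t) = "O" :: insDot t := by simp [insDot]

lemma compactR_O (t : List String) : compactR ("O" :: t) = "O" :: compactR t := by simp [compactR]

lemma compactR_dot (t : List String) : compactR ("." :: t) = insDot (compactR t) := by simp [compactR]

lemma compactR_barrier (x : String) (hO : x ≠ "O") (hd : x ≠ ".") (t : List String) :
    compactR (x :: t) = x :: compactR t := by simp [compactR, hO, hd]

lemma length_insDot (l : List String) : (insDot l).length = l.length + 1 := by
  induction l with
  | nil => simp [insDot]
  | cons x t ih => simp only [insDot]; split <;> simp [ih]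

lemma length_compactR (l : List String) : (compactR l).length = l.length := by
  induction l with
  | nil => simp [compactR]
  | cons x t ih =>
    simp only [compactR]
    split
    · simp [ih]
    · split
      · simp [length_insDot, ih]
      · simp [ih]

lemma compactR_passRec (k : Nat) (l : List String) :
    compactR (passRec k l) = compactR l := by
  induction k generalizing l with
  | zero => simp [passRec]
  | succ k ih =>
    match l with
    | [] => simp [passRec]
    | [x] => simp [passRec]
    | x :: y :: t =>
      simp only [passRec]
      split
      · rename_i h
        rw [compactR_O, ih, h.1, h.2]
        simp [compactR, insDot]
      · rename_i h
        by_cases hxO : x = "O"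
        · subst hxO; rw [compactR_O, ih, compactR_O]
        · by_cases hxd : x = "."
          · subst hxd
            rw [compactR_dot, ih, compactR_dot]
          · rw [compactR_barrier x hxO hxd, ih, compactR_barrier x hxO hxd]

lemma passRec_prefix (j : Nat) (u v : List String) (h : j < u.length) :
    passRec j (u ++ v) = passRec j u ++ v := by
  induction j generalizing u v with
  | zero => simp [passRec]
  | succ j ih =>
    rcases u with _ | ⟨x, u'⟩
    · simp at h
    · rcases u' with _ | ⟨y, t⟩
      · simp at h
      · simp only [List.cons_append, passRec]
        split
        · have := ih ("." :: t) v (by simp at h ⊢; omega)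
          simp only [List.cons_append] at this
          rw [this]; rfl
        · have := ih (y :: t) v (by simp at h ⊢; omega)
          simp only [List.cons_append] at this
          rw [this]; rfl

lemma passRec_split (b : String) (hbd : b ≠ ".") (hbO : b ≠ "O") :
    ∀ (N : Nat) (u : List String), u.length = N → ∀ (j : Nat) (v : List String),
      passRec j (u ++ b :: v) = passRec j u ++ b :: passRec (j - (N + 1)) v := by
  intro N
  induction N with
  | zero =>
    intro u hu j v
    have hu0 : u = [] := List.eq_nil_of_length_eq_zero hu
    subst hu0
    rcases j with _ | j
    · simp [passRec]
    · rcases v with _ | ⟨y, t⟩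
      · simp [passRec, passRec_nil]
      · have hcc : ¬ (b = "." ∧ y = "O") := by rintro ⟨h1, _⟩; exact hbd h1
        simp [passRec, hcc, Nat.succ_sub_one]
  | succ N ih =>
    intro u hu j v
    rcases u with _ | ⟨x, u'⟩
    · simp at hu
    · have hu' : u'.length = N := by simpa using hu
      rcases j with _ | j
      · simp [passRec]
      · rcases u' with _ | ⟨y, t'⟩
        · -- u = [x], N = 0
          have hN : N = 0 := by simpa using hu'.symm
          subst hN
          have hc : ¬ (x = "." ∧ b = "O") := by rintro ⟨_, h2⟩; exact hbO h2
          have base := ih [] rfl j v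
          simp only [List.nil_append, passRec_nil] at base
          simp only [List.cons_append, List.nil_append, passRec, if_neg hc,
            passRec_singleton]
          rw [base]
          have e : j + 1 - (0 + 1 + 1) = j - (0 + 1) := by omega
          rw [e]
        · simp only [List.cons_append, passRec]
          split
          · have h9 := ih ("." :: t') (by simpa using hu') j v
            simp only [List.cons_append] at h9 ⊢
            rw [h9]
            have e : j + 1 - (N + 1 + 1) = j - (N + 1) := by omega
            rw [e]
          · have h9 := ih (y :: t') (by simpa using hu') j v
            simp only [List.cons_append] at h9 ⊢
            rw [h9]
            have e : j + 1 - (N + 1 + 1) = j - (N + 1) := by omega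
            rw [e]

lemma foldSched_prefix (m : Nat) (u v : List String) (h : m + 1 ≤ u.length) :
    foldSched m (u ++ v) = foldSched m u ++ v := by
  induction m generalizing u with
  | zero => simp [foldSched]
  | succ m ih =>
    simp only [foldSched]
    rw [passRec_prefix (m+1) u v (by omega), ih]
    rw [length_passRec]; omega

lemma foldSched_split (b : String) (hbd : b ≠ ".") (hbO : b ≠ "O") (m : Nat) :
    ∀ (u v : List String),
      foldSched m (u ++ b :: v) = foldSched m u ++ b :: foldSched (m - (u.length + 1)) v := by
  induction m with
  | zero => intro u v; simp [foldSched]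
  | succ m ih =>
    intro u v
    simp only [foldSched]
    rw [passRec_split b hbd hbO u.length u rfl, ih]
    have h1 : (passRec (m+1) u).length = u.length := length_passRec _ _
    rw [h1]
    have h2 : m + 1 - (u.length + 1) = m - u.length := by omega
    rw [h2]
    congr 2
    by_cases hc : u.length + 1 ≤ m
    · have h3 : m - u.length = (m - (u.length + 1)) + 1 := by omega
      rw [h3]
      rfl
    · have h7 : m - u.length = 0 ∨ m - u.length = 1 := by omega
      have h8 : m - (u.length + 1) = 0 := by omega
      rw [h8]
      rcases h7 with h7 | h7 <;> rw [h7] <;> simp [foldSched, passRec]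

-- ---------- purity and the segment theorem ----------

lemma pureL_cons {x : String} {t : List String} :
    PureL (x :: t) ↔ (x = "O" ∨ x = ".") ∧ PureL t := by
  simp [PureL]

lemma pure_passRec (k : Nat) (l : List String) (h : PureL l) : PureL (passRec k l) := by
  induction k generalizing l with
  | zero => simpa [passRec]
  | succ k ih =>
    match l with
    | [] => simpa [passRec]
    | [x] => simpa [passRec]
    | x :: y :: t =>
      rw [pureL_cons, pureL_cons] at h
      simp only [passRec]
      split
      · rw [pureL_cons]
        exact ⟨Or.inl rfl, ih _ (pureL_cons.2 ⟨Or.inr rfl, h.2.2⟩)⟩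
      · rw [pureL_cons]
        exact ⟨h.1, ih _ (pureL_cons.2 ⟨h.2.1, h.2.2⟩)⟩

lemma insDot_replicate_O (a : Nat) (m : List String) :
    insDot (List.replicate a "O" ++ m) = List.replicate a "O" ++ insDot m := by
  induction a with
  | zero => simp
  | succ a ih => simp [List.replicate_succ, insDot, ih]

lemma insDot_dots (b : Nat) :
    insDot (List.replicate b ".") = List.replicate (b + 1) "." := by
  cases b with
  | zero => simp [insDot]
  | succ b => simp [List.replicate_succ, insDot]

lemma compactR_replicate_form (a b : Nat) :
    compactR (List.replicate a "O" ++ List.replicate b ".") =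
      List.replicate a "O" ++ List.replicate b "." := by
  induction a with
  | zero =>
    simp only [List.replicate_zero, List.nil_append]
    induction b with
    | zero => simp [compactR]
    | succ b ihb => simp [List.replicate_succ, compactR_dot, ihb, insDot_dots]
  | succ a ih => simp [List.replicate_succ, compactR_O, ih]

lemma compactR_pure (l : List String) (h : PureL l) :
    compactR l = List.replicate (l.count "O") "O" ++ List.replicate (l.count ".") "." := by
  induction l with
  | nil => simp [compactR]
  | cons x t ih =>
    rw [pureL_cons] at h
    rcases h.1 with hx | hx
    · subst hx
      rw [compactR_O, ih h.2]
      have h1 : ("O" :: t).count "O" = t.count "O" + 1 := by simp [List.count_cons]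
      have h2 : ("O" :: t).count "." = t.count "." := by simp [List.count_cons]
      rw [h1, h2, List.replicate_succ]
      rfl
    · subst hx
      rw [compactR_dot, ih h.2, insDot_replicate_O, insDot_dots]
      have h1 : ("." :: t).count "O" = t.count "O" := by simp [List.count_cons]
      have h2 : ("." :: t).count "." = t.count "." + 1 := by simp [List.count_cons]
      rw [h1, h2]

lemma passRec_allO (k : Nat) (l : List String) (h : ∀ x ∈ l, x = "O") : passRec k l = l := by
  induction k generalizing l with
  | zero => simp [passRec]
  | succ k ih =>
    match l with
    | [] => simp [passRec]
    | [x] => simp [passRec]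
    | x :: y :: t =>
      have hx : x = "O" := h x (by simp)
      have hcc : ¬ (x = "." ∧ y = "O") := by
        rintro ⟨h1, _⟩; rw [hx] at h1; exact absurd h1 (by decide)
      simp only [passRec, if_neg hcc]
      rw [ih (y :: t) (fun z hz => h z (by simp at hz ⊢; tauto))]

lemma foldSched_allO (m : Nat) (l : List String) (h : ∀ x ∈ l, x = "O") : foldSched m l = l := by
  induction m with
  | zero => simp [foldSched]
  | succ m ih => simp [foldSched, passRec_allO _ _ h, ih]

lemma compactR_allO (l : List String) (h : ∀ x ∈ l, x = "O") : compactR l = l := by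
  induction l with
  | nil => simp [compactR]
  | cons x t ih =>
    have hx : x = "O" := h x (by simp)
    subst hx
    rw [compactR_O, ih (fun z hz => h z (by simp [hz]))]

lemma passRec_ends_dot (k : Nat) (l : List String) (hp : PureL l) (hd : "." ∈ l)
    (hk : l.length ≤ k + 1) : ∃ l', passRec k l = l' ++ ["."] := by
  induction k generalizing l with
  | zero =>
    match l, hd with
    | [x], hd =>
      have h' : ("." : String) = x := by simpa using hd
      exact ⟨[], by simp [passRec, h'.symm]⟩
  | succ k ih =>
    match l with
    | [] => simp at hd
    | [x] =>
      have h' : ("." : String) = x := by simpa using hd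
      exact ⟨[], by simp [passRec_singleton, h'.symm]⟩
    | x :: y :: t =>
      rw [pureL_cons, pureL_cons] at hp
      simp only [passRec]
      split
      · rename_i hc
        have hp' : PureL ("." :: t) := pureL_cons.2 ⟨Or.inr rfl, hp.2.2⟩
        obtain ⟨p, hpEq⟩ := ih ("." :: t) hp' (by simp) (by simp at hk ⊢; omega)
        exact ⟨"O" :: p, by rw [hpEq]; rfl⟩
      · rename_i hc
        have hd' : "." ∈ y :: t := by
          by_cases hyt : "." ∈ y :: t
          · exact hyt
          · exfalso
            have hx : x = "." := by
              rcases List.mem_cons.1 hd with h1 | h1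
              · exact h1.symm
              · exact absurd h1 hyt
            have hy : y = "O" := by
              rcases hp.2.1 with h2 | h2
              · exact h2
              · exact absurd (by simp [h2]) hyt
            exact hc ⟨hx, hy⟩
        have hp' : PureL (y :: t) := pureL_cons.2 ⟨hp.2.1, hp.2.2⟩
        obtain ⟨p, hpEq⟩ := ih (y :: t) hp' hd' (by simp at hk ⊢; omega)
        exact ⟨x :: p, by rw [hpEq]; rfl⟩

lemma Tpure (m : Nat) (l : List String) (hp : PureL l) (hl : l.length ≤ m + 1) :
    foldSched m l = compactR l := by
  induction m generalizing l with
  | zero =>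
    match l, hl with
    | [], _ => simp [foldSched, compactR]
    | [x], _ =>
      rcases pureL_cons.1 hp |>.1 with hx | hx <;> subst hx <;>
        simp [foldSched, compactR, insDot]
  | succ m ih =>
    by_cases hc : l.length ≤ m + 1
    · have h1 : foldSched (m+1) l = foldSched m (passRec (m+1) l) := rfl
      rw [h1, ih (passRec (m+1) l) (pure_passRec _ _ hp) (by rw [length_passRec]; exact hc),
        compactR_passRec]
    · by_cases hd : "." ∈ l
      · obtain ⟨l', hl'⟩ := passRec_ends_dot (m+1) l hp hd hl
        have hlen : l'.length = m + 1 := by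
          have := length_passRec (m+1) l
          rw [hl'] at this
          simp at this
          omega
        have hpure' : PureL l' := by
          intro z hz
          have := pure_passRec (m+1) l hp
          rw [hl'] at this
          exact this z (by simp [hz])
        have h1 : foldSched (m+1) l = foldSched m (passRec (m+1) l) := rfl
        rw [h1, hl', foldSched_prefix m l' ["."] (by omega), ih l' hpure' (by omega)]
        have h2 : compactR l' ++ ["."] = compactR (l' ++ ["."]) := by
          rw [compactR_pure l' hpure', compactR_pure (l' ++ ["."])
            (by intro z hz; rcases List.mem_append.1 hz with h | h
                · exact hpure' z h
                · simp at h; subst h; exact Or.inr rfl)]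
          have c1 : (l' ++ ["."]).count "O" = l'.count "O" := by
            simp [List.count_append]
          have c2 : (l' ++ ["."]).count "." = l'.count "." + 1 := by
            simp [List.count_append]
          rw [c1, c2, List.replicate_succ']
          simp
        rw [h2, ← hl', compactR_passRec]
      · have hO : ∀ x ∈ l, x = "O" := by
          intro x hx
          rcases hp x hx with h | h
          · exact h
          · exact absurd (h ▸ hx) hd
        rw [foldSched_allO _ _ hO, compactR_allO _ hO]

lemma splitAtBarrier (l : List String) (h : ¬ PureL l) :
    ∃ u b v, l = u ++ b :: v ∧ PureL u ∧ b ≠ "O" ∧ b ≠ "." := by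
  induction l with
  | nil => exact absurd (by intro x hx; simp at hx) h
  | cons x t ih =>
    by_cases hx : x = "O" ∨ x = "."
    · have ht : ¬ PureL t := by
        intro hpt
        exact h (pureL_cons.2 ⟨hx, hpt⟩)
      obtain ⟨u, b, v, h1, h2, h3, h4⟩ := ih ht
      exact ⟨x :: u, b, v, by simp [h1], pureL_cons.2 ⟨hx, h2⟩, h3, h4⟩
    · push_neg at hx
      exact ⟨[], x, t, rfl, by intro z hz; simp at hz, hx.1, hx.2⟩

lemma insDot_append_barrier (p q : List String) (b : String) (hb : b ≠ "O") :
    insDot (p ++ b :: q) = insDot p ++ b :: q := by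
  induction p with
  | nil => simp [insDot, hb]
  | cons x p' ih =>
    by_cases hx : x = "O"
    · subst hx
      simp only [List.cons_append, insDot_O, ih]
    · simp [insDot, hx]

lemma compactR_split (b : String) (hbO : b ≠ "O") (hbd : b ≠ ".") (u v : List String) :
    compactR (u ++ b :: v) = compactR u ++ b :: compactR v := by
  induction u with
  | nil => simp [compactR_barrier b hbO hbd, compactR]
  | cons x u' ih =>
    by_cases hx : x = "O"
    · subst hx
      simp only [List.cons_append, compactR_O, ih]
    · by_cases hxd : x = "."
      · subst hxd
        simp only [List.cons_append, compactR_dot, ih]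
        rw [insDot_append_barrier _ _ b hbO]
      · simp only [List.cons_append, compactR_barrier x hx hxd, ih]

lemma Tmain : ∀ (N : Nat) (l : List String), l.length ≤ N →
    ∀ m, l.length ≤ m + 1 → foldSched m l = compactR l := by
  intro N
  induction N with
  | zero =>
    intro l hN m _
    have : l = [] := by
      cases l with
      | nil => rfl
      | cons x t => simp at hN
    subst this
    simp [foldSched_nil, compactR]
  | succ N ih =>
    intro l hN m hm
    by_cases hp : PureL l
    · exact Tpure m l hp hm
    · obtain ⟨u, b, v, hEq, hu, hbO, hbd⟩ := splitAtBarrier l hp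
      subst hEq
      rw [foldSched_split b hbd hbO m u v, compactR_split b hbO hbd u v]
      have hlen : u.length + 1 + v.length = u.length + (v.length + 1) := by omega
      have hul : u.length ≤ m := by
        simp [List.length_append] at hm
        omega
      have hvN : v.length ≤ N := by
        simp [List.length_append] at hN
        omega
      have hvm : v.length ≤ (m - (u.length + 1)) + 1 := by
        simp [List.length_append] at hm
        omega
      rw [Tpure m u hu (by omega), ih v hvN (m - (u.length + 1)) hvm]

-- ---------- B's fold computes compactR ----------

lemma compactR_replO_append (a : Nat) (m : List String) :
    compactR (List.replicate a "O" ++ m) = List.replicate a "O" ++ compactR m := by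
  induction a with
  | zero => simp
  | succ a ih => simp [List.replicate_succ, compactR_O, ih]

lemma compactR_pullO (b : Nat) (rest : List String) :
    compactR (List.replicate b "." ++ "O" :: rest)
      = "O" :: compactR (List.replicate b "." ++ rest) := by
  induction b with
  | zero => simp [compactR_O]
  | succ b ih =>
    simp only [List.replicate_succ, List.cons_append, compactR_dot, ih, insDot_O]

def cbF : (List String × Nat × Nat) → String → (List String × Nat × Nat) :=
  fun st cell =>
    if cell = "O" then (st.1, st.2.1 + 1, st.2.2)
    else if cell = "." then (st.1, st.2.1, st.2.2 + 1)
    else (st.1 ++ (List.replicate st.2.1 "O" ++ List.replicate st.2.2 ".") ++ [cell], 0, 0)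

def cbFlush (st : List String × Nat × Nat) : List String :=
  st.1 ++ (List.replicate st.2.1 "O" ++ List.replicate st.2.2 ".")

lemma compactB_as_F (l : List String) : compactB l = cbFlush (l.foldl cbF ([], 0, 0)) := rfl

lemma compactB_inv :
    ∀ (rest out : List String) (ro rd : Nat),
      cbFlush (rest.foldl cbF (out, ro, rd))
        = out ++ compactR (List.replicate ro "O" ++ (List.replicate rd "." ++ rest)) := by
  intro rest
  induction rest with
  | nil =>
    intro out ro rd
    simp only [List.foldl_nil, List.append_nil, cbFlush]
    rw [compactR_replicate_form]
  | cons cell rest ih =>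
    intro out ro rd
    by_cases hO : cell = "O"
    · subst hO
      simp only [List.foldl_cons, cbF]
      rw [if_true, ih out (ro + 1) rd]
      congr 1
      rw [compactR_replO_append, compactR_replO_append, compactR_pullO,
        List.replicate_succ', List.append_assoc]
      rfl
    · by_cases hd : cell = "."
      · subst hd
        simp only [List.foldl_cons, cbF]
        rw [if_neg (by decide : ¬ ("." : String) = "O"), if_true, ih out ro (rd + 1)]
        congr 2
        rw [List.replicate_succ', List.append_assoc]
        simp
      · simp only [List.foldl_cons, cbF]
        rw [if_neg hO, if_neg hd, ih]
        simp only [List.replicate_zero, List.nil_append]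
        rw [show (List.replicate ro "O" ++ (List.replicate rd "." ++ cell :: rest) : List String)
              = (List.replicate ro "O" ++ List.replicate rd ".") ++ cell :: rest by simp,
          compactR_split cell hO hd, compactR_replicate_form]
        simp

lemma compactB_eq (l : List String) : compactB l = compactR l := by
  have := compactB_inv l [] 0 0
  rw [compactB_as_F, this]
  simp

-- ---------- mirror layer: backward passes are forward passes on the reverse ----------

lemma reverse_set {α : Type} (l : List α) (i : Nat) (x : α) (h : i < l.length) :
    (l.set i x).reverse = l.reverse.set (l.length - 1 - i) x := by
  apply List.ext_getElem (by simp)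
  intro j h1 h2
  simp only [List.length_reverse, List.length_set] at h1 h2
  rw [List.getElem_reverse]
  rw [List.getElem_set, List.getElem_set]
  by_cases hc : i = (l.set i x).length - 1 - j
  · rw [if_pos (by simp at hc ⊢; omega), if_pos (by simp at hc ⊢; omega)]
  · rw [if_neg (by simp at hc ⊢; omega), if_neg (by simp at hc ⊢; omega),
      List.getElem_reverse]
    congr 1
    simp

lemma reverse_set_rev {α : Type} (l : List α) (i : Nat) (x : α) (h : i < l.length) :
    (l.reverse.set i x).reverse = l.set (l.length - 1 - i) x := by
  have := reverse_set l.reverse i x (by simpa using h)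
  simpa using this

lemma getD_reverse (l : List String) (i : Nat) (h : i < l.length) :
    l.reverse.getD i "" = l.getD (l.length - 1 - i) "" := by
  rw [List.getD_eq_getElem?_getD, List.getD_eq_getElem?_getD]
  rw [List.getElem?_eq_getElem (by simpa using h), List.getElem?_eq_getElem (by omega)]
  simp [List.getElem_reverse]

lemma bstep_conj (l : List String) (c : Nat) (h1 : 1 ≤ c) (h2 : c < l.length) :
    bstep c l = (step1 (l.length - 1 - c) l.reverse).reverse := by
  have e1 : l.reverse.getD (l.length - 1 - c) "" = l.getD c "" := by
    rw [getD_reverse l _ (by omega)]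
    congr 1
    omega
  have e2 : l.reverse.getD (l.length - 1 - c + 1) "" = l.getD (c - 1) "" := by
    rw [getD_reverse l _ (by omega)]
    congr 1
    omega
  rw [bstep, step1, e1, e2]
  by_cases hcond : l.getD (c - 1) "" = "O" ∧ l.getD c "" = "."
  · rw [if_pos hcond, if_pos ⟨hcond.2, hcond.1⟩]
    rw [reverse_set (l.reverse.set (l.length - 1 - c) (l.getD (c-1) "")) _ _
      (by simp; omega)]
    have e3 : (l.reverse.set (l.length - 1 - c) (l.getD (c-1) "")).reverse
        = l.set c (l.getD (c-1) "") := by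
      rw [reverse_set_rev l _ _ (by omega)]
      congr 1
      omega
    rw [e3]
    congr 1
    simp only [List.length_set, List.length_reverse]
    omega
  · rw [if_neg hcond, if_neg (by rintro ⟨ha, hb⟩; exact hcond ⟨hb, ha⟩)]
    simp

lemma cfold (Nn : Nat) (L : List Nat) :
    ∀ (l : List String), l.length = Nn → (∀ k ∈ L, k + 1 < Nn) →
      L.foldl (fun l k => bstep (Nn - 1 - k) l) l
        = (L.foldl (fun l k => step1 k l) l.reverse).reverse := by
  induction L with
  | nil => intro l _ _; simp
  | cons a L ih =>
    intro l hl hk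
    have ha : a + 1 < Nn := hk a (by simp)
    simp only [List.foldl_cons]
    have e1 : bstep (Nn - 1 - a) l = (step1 a l.reverse).reverse := by
      rw [bstep_conj l (Nn - 1 - a) (by omega) (by omega)]
      congr 1
      · congr 1
        omega
    rw [e1, ih _ (by simp [length_step1, hl]) (fun k hkk => hk k (by simp [hkk]))]
    simp

lemma foldl_congr_mem' {α β : Type} (L : List β) (f g : α → β → α)
    (h : ∀ x ∈ L, ∀ acc, f acc x = g acc x) : ∀ a, L.foldl f a = L.foldl g a := by
  induction L with
  | nil => intro a; rfl
  | cons b L ih =>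
    intro a
    simp only [List.foldl_cons]
    rw [h b (by simp) a]
    exact ih (fun x hx acc => h x (by simp [hx]) acc) _

lemma fsAsc (m : Nat) : ∀ (l : List String),
    (List.range m).foldl (fun l k => (passRec (m - k) l.reverse).reverse) l
      = (foldSched m l.reverse).reverse := by
  induction m with
  | zero => intro l; simp [foldSched]
  | succ m ih =>
    intro l
    rw [List.range_succ_eq_map]
    simp only [List.foldl_cons, Nat.sub_zero, List.foldl_map]
    rw [foldl_congr_mem' _ _ (fun l k => (passRec (m - k) l.reverse).reverse)
      (by intro x _ acc; congr 2; omega)]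
    rw [ih ((passRec (m + 1) l.reverse).reverse)]
    simp only [List.reverse_reverse]
    rfl

lemma foldl_preserve {α β : Type} (P : α → Prop) (f : α → β → α)
    (h : ∀ a b, P a → P (f a b)) : ∀ (L : List β) (a : α), P a → P (L.foldl f a) := by
  intro L
  induction L with
  | nil => intro a ha; exact ha
  | cons b L ih => intro a ha; exact ih _ (h a b ha)

-- pyRange folds over non-negative bounds are List.range folds
lemma foldl_pyRange_asc {α : Type} (W : Nat) (f : α → Int → α) (fn : α → Nat → α)
    (h : ∀ a (k : Nat), k < W → f a (↑k) = fn a k) (a : α) :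
    (PySem.List.pyRange 0 (↑W) 1).foldl f a = (List.range W).foldl fn a := by
  rw [PySem.List.pyRange_one]
  have e : ((W : Int) - 0).toNat = W := by omega
  rw [e, List.foldl_map]
  apply foldl_congr_mem'
  intro k hk acc
  have hk' : k < W := List.mem_range.1 hk
  have e2 : ((0 : Int) + ↑k) = (↑k : Int) := by omega
  rw [e2, h acc k hk']

lemma foldl_pyRange_desc {α : Type} (A L : Nat) (f : α → Int → α) (fn : α → Nat → α)
    (h : ∀ a (m : Nat), L < m → m ≤ A → f a (↑m) = fn a m) (x : α) :
    (PySem.List.pyRange (↑A) (↑L) (-1)).foldl f x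
      = (List.range (A - L)).foldl (fun x k => fn x (A - k)) x := by
  rw [PySem.List.pyRange_neg_one]
  have e : ((A : Int) - ↑L).toNat = A - L := by omega
  rw [e, List.foldl_map]
  apply foldl_congr_mem'
  intro k hk acc
  have hk' : k < A - L := List.mem_range.1 hk
  have e2 : ((A : Int) - ↑k) = ↑(A - k) := by omega
  rw [e2, h acc (A - k) (by omega) (by omega)]

lemma foldl_pyRange_desc0 {α : Type} (A : Nat) (f : α → Int → α) (fn : α → Nat → α)
    (h : ∀ a (m : Nat), 0 < m → m ≤ A → f a (↑m) = fn a m) (x : α) :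
    (PySem.List.pyRange (↑A) 0 (-1)).foldl f x
      = (List.range A).foldl (fun x k => fn x (A - k)) x := by
  have := foldl_pyRange_desc A 0 f fn (fun a m h1 h2 => h a m h1 h2) x
  simpa using this

-- ---------- grid layer: Nat-indexed steps and schedules ----------

def setCellN (g : List (List String)) (r c : Nat) (v : String) : List (List String) :=
  g.set r ((g.getD r []).set c v)

def stepNn (r c : Nat) (g : List (List String)) : List (List String) :=
  if (g.getD r []).getD c "" = "." ∧ (g.getD (r + 1) []).getD c "" = "O" then
    setCellN (setCellN g r c ((g.getD (r + 1) []).getD c "")) (r + 1) c ((g.getD r []).getD c "")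
  else g

def stepSn (r c : Nat) (g : List (List String)) : List (List String) :=
  if (g.getD (r - 1) []).getD c "" = "O" ∧ (g.getD r []).getD c "" = "." then
    setCellN (setCellN g r c ((g.getD (r - 1) []).getD c "")) (r - 1) c ((g.getD r []).getD c "")
  else g

def stepWn (r c : Nat) (g : List (List String)) : List (List String) :=
  if (g.getD r []).getD c "" = "." ∧ (g.getD r []).getD (c + 1) "" = "O" then
    setCellN (setCellN g r c ((g.getD r []).getD (c + 1) "")) r (c + 1) ((g.getD r []).getD c "")
  else g

def stepEn (r c : Nat) (g : List (List String)) : List (List String) :=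
  if (g.getD r []).getD (c - 1) "" = "O" ∧ (g.getD r []).getD c "" = "." then
    setCellN (setCellN g r c ((g.getD r []).getD (c - 1) "")) r (c - 1) ((g.getD r []).getD c "")
  else g

def innColN (w r : Nat) (g : List (List String)) : List (List String) :=
  (List.range w).foldl (fun g c => stepNn r c g) g
def passN (w last : Nat) (g : List (List String)) : List (List String) :=
  (List.range last).foldl (fun g r => innColN w r g) g
def schedN (w n1 : Nat) (g : List (List String)) : List (List String) :=
  (List.range n1).foldl (fun g k => passN w (n1 - k) g) g

def innColS (w r : Nat) (g : List (List String)) : List (List String) :=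
  (List.range w).foldl (fun g c => stepSn r c g) g
def passS (w n1 last : Nat) (g : List (List String)) : List (List String) :=
  (List.range (n1 - last)).foldl (fun g k => innColS w (n1 - k) g) g
def schedS (w n1 : Nat) (g : List (List String)) : List (List String) :=
  (List.range n1).foldl (fun g last => passS w n1 last g) g

def innRowW (n c : Nat) (g : List (List String)) : List (List String) :=
  (List.range n).foldl (fun g r => stepWn r c g) g
def passW (n last : Nat) (g : List (List String)) : List (List String) :=
  (List.range last).foldl (fun g c => innRowW n c g) g
def schedW (n w1 : Nat) (g : List (List String)) : List (List String) :=
  (List.range w1).foldl (fun g k => passW n (w1 - k) g) g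

def innRowE (n c : Nat) (g : List (List String)) : List (List String) :=
  (List.range n).foldl (fun g r => stepEn r c g) g
def passE (n w1 last : Nat) (g : List (List String)) : List (List String) :=
  (List.range (w1 - last)).foldl (fun g k => innRowE n (w1 - k) g) g
def schedE (n w1 : Nat) (g : List (List String)) : List (List String) :=
  (List.range w1).foldl (fun g last => passE n w1 last g) g

-- the Int-level port steps reduce to the Nat-level steps on the loops' non-negative indices
lemma stepN_nat (g : List (List String)) (r c : Nat) : stepN g (↑r) (↑c) = stepNn r c g := by
  have h1 : ((r : Int) + 1) = ((r + 1 : Nat) : Int) := by push_cast; ring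
  simp only [stepN, stepNn, pyCell, setCell, setCellN, h1, PySem.List.pyGetD_natCast,
    Int.toNat_natCast]

lemma stepS_nat (g : List (List String)) (r c : Nat) (hr : 1 ≤ r) :
    stepS g (↑r) (↑c) = stepSn r c g := by
  have h1 : ((r : Int) - 1) = ((r - 1 : Nat) : Int) := by omega
  simp only [stepS, stepSn, pyCell, setCell, setCellN, h1, PySem.List.pyGetD_natCast,
    Int.toNat_natCast]

lemma stepW_nat (g : List (List String)) (r c : Nat) : stepW g (↑r) (↑c) = stepWn r c g := by
  have h1 : ((c : Int) + 1) = ((c + 1 : Nat) : Int) := by push_cast; ring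
  simp only [stepW, stepWn, pyCell, setCell, setCellN, h1, PySem.List.pyGetD_natCast,
    Int.toNat_natCast]

lemma stepE_nat (g : List (List String)) (r c : Nat) (hc : 1 ≤ c) :
    stepE g (↑r) (↑c) = stepEn r c g := by
  have h1 : ((c : Int) - 1) = ((c - 1 : Nat) : Int) := by omega
  simp only [stepE, stepEn, pyCell, setCell, setCellN, h1, PySem.List.pyGetD_natCast,
    Int.toNat_natCast]

-- ---------- columns of the grid ----------

def colGet (c : Nat) (g : List (List String)) : List String :=
  g.map (fun row => row.getD c "")

def RectW (g : List (List String)) (w : Nat) : Prop := ∀ row ∈ g, row.length = w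

lemma length_colGet (c : Nat) (g : List (List String)) : (colGet c g).length = g.length := by
  simp [colGet]

lemma colGet_getD (c : Nat) (g : List (List String)) (r : Nat) :
    (colGet c g).getD r "" = (g.getD r []).getD c "" := by
  rw [colGet, List.getD_eq_getElem?_getD, List.getElem?_map, List.getD_eq_getElem?_getD]
  cases h : g[r]? with
  | none => simp [h]
  | some row => simp [h, List.getD_eq_getElem?_getD]

lemma length_setCellN (g : List (List String)) (r c : Nat) (v : String) :
    (setCellN g r c v).length = g.length := by simp [setCellN]

lemma rect_setCellN {g : List (List String)} {w : Nat} (hg : RectW g w) (r c : Nat) (v : String) :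
    RectW (setCellN g r c v) w := by
  intro row hrow
  by_cases hr : r < g.length
  · rcases List.mem_or_eq_of_mem_set hrow with h | h
    · exact hg row h
    · subst h
      rw [List.length_set, List.getD_eq_getElem g [] hr]
      exact hg _ (List.getElem_mem hr)
  · rw [setCellN, set_oor _ _ _ (by omega)] at hrow
    exact hg row hrow

lemma colGet_setCellN_ne {c' c : Nat} (hcc : c' ≠ c) (g : List (List String)) (r : Nat) (v : String) :
    colGet c (setCellN g r c' v) = colGet c g := by
  rw [setCellN]
  show (g.set r ((g.getD r []).set c' v)).map (fun row => row.getD c "") = colGet c g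
  rw [List.map_set]
  have e1 : ((g.getD r []).set c' v).getD c "" = (g.getD r []).getD c "" :=
    getD_set_ne _ _ _ _ _ hcc
  rw [e1, ← colGet_getD c g r]
  exact set_getD_self _ _ _

lemma colGet_setCellN_self {g : List (List String)} {w c : Nat} (hg : RectW g w) (hc : c < w)
    (r : Nat) (v : String) :
    colGet c (setCellN g r c v) = (colGet c g).set r v := by
  by_cases hr : r < g.length
  · rw [setCellN]
    show (g.set r ((g.getD r []).set c v)).map (fun row => row.getD c "") = _
    rw [List.map_set]
    have hrow : (g.getD r []).length = w := by
      rw [List.getD_eq_getElem g [] hr]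
      exact hg _ (List.getElem_mem hr)
    have e1 : ((g.getD r []).set c v).getD c "" = v := by
      rw [getD_set_self, hrow, if_pos hc]
    rw [e1]
    rfl
  · rw [setCellN, set_oor g r _ (by omega),
      set_oor (colGet c g) r v (by rw [length_colGet]; omega)]

-- N-step column lemmas
lemma colGet_stepNn_ne {c' c : Nat} (hcc : c' ≠ c) (r : Nat) (g : List (List String)) :
    colGet c (stepNn r c' g) = colGet c g := by
  rw [stepNn]
  split
  · rw [colGet_setCellN_ne hcc, colGet_setCellN_ne hcc]
  · rfl

lemma colGet_stepNn_self {g : List (List String)} {w c : Nat} (hg : RectW g w) (hc : c < w)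
    (r : Nat) : colGet c (stepNn r c g) = step1 r (colGet c g) := by
  rw [stepNn, step1]
  by_cases hA : (g.getD r []).getD c "" = "." ∧ (g.getD (r+1) []).getD c "" = "O"
  · rw [if_pos hA, if_pos (by rw [colGet_getD, colGet_getD]; exact hA)]
    rw [colGet_setCellN_self (rect_setCellN hg r c _) hc,
      colGet_setCellN_self hg hc]
    rw [colGet_getD, colGet_getD]
  · rw [if_neg hA, if_neg (by rw [colGet_getD, colGet_getD]; exact hA)]

lemma rect_stepNn {g : List (List String)} {w : Nat} (hg : RectW g w) (r c : Nat) :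
    RectW (stepNn r c g) w := by
  rw [stepNn]; split
  · exact rect_setCellN (rect_setCellN hg _ _ _) _ _ _
  · exact hg

lemma length_stepNn (r c : Nat) (g : List (List String)) :
    (stepNn r c g).length = g.length := by
  rw [stepNn]; split <;> simp [length_setCellN]

-- S-step column lemmas
lemma colGet_stepSn_ne {c' c : Nat} (hcc : c' ≠ c) (r : Nat) (g : List (List String)) :
    colGet c (stepSn r c' g) = colGet c g := by
  rw [stepSn]
  split
  · rw [colGet_setCellN_ne hcc, colGet_setCellN_ne hcc]
  · rfl

lemma colGet_stepSn_self {g : List (List String)} {w c : Nat} (hg : RectW g w) (hc : c < w)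
    (r : Nat) : colGet c (stepSn r c g) = bstep r (colGet c g) := by
  rw [stepSn, bstep]
  by_cases hA : (g.getD (r-1) []).getD c "" = "O" ∧ (g.getD r []).getD c "" = "."
  · rw [if_pos hA, if_pos (by rw [colGet_getD, colGet_getD]; exact hA)]
    rw [colGet_setCellN_self (rect_setCellN hg r c _) hc,
      colGet_setCellN_self hg hc]
    rw [colGet_getD, colGet_getD]
  · rw [if_neg hA, if_neg (by rw [colGet_getD, colGet_getD]; exact hA)]

lemma rect_stepSn {g : List (List String)} {w : Nat} (hg : RectW g w) (r c : Nat) :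
    RectW (stepSn r c g) w := by
  rw [stepSn]; split
  · exact rect_setCellN (rect_setCellN hg _ _ _) _ _ _
  · exact hg

lemma length_stepSn (r c : Nat) (g : List (List String)) :
    (stepSn r c g).length = g.length := by
  rw [stepSn]; split <;> simp [length_setCellN]

-- inner column loops act on each column once
lemma colGet_innColN {g : List (List String)} {w c : Nat} (hg : RectW g w) (hc : c < w)
    (r : Nat) : colGet c (innColN w r g) = step1 r (colGet c g) := by
  have aux : ∀ (L : List Nat), L.Nodup →
      ∀ g, RectW g w → colGet c (L.foldl (fun g c' => stepNn r c' g) g) =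
        if c ∈ L then step1 r (colGet c g) else colGet c g := by
    intro L
    induction L with
    | nil => intro _ g _; simp
    | cons a L ih =>
      intro hnd g hg
      have hnd' : L.Nodup := (List.nodup_cons.1 hnd).2
      have hna : a ∉ L := (List.nodup_cons.1 hnd).1
      simp only [List.foldl_cons]
      rw [ih hnd' _ (rect_stepNn hg r a)]
      by_cases hac : a = c
      · subst hac
        rw [if_neg (by simpa using hna), colGet_stepNn_self hg hc, if_pos (by simp)]
      · rw [colGet_stepNn_ne hac]
        by_cases hcl : c ∈ L
        · rw [if_pos hcl, if_pos (by simp [hcl])]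
        · rw [if_neg hcl, if_neg (by simp [hcl, Ne.symm hac])]
  have := aux (List.range w) (List.nodup_range) g hg
  rw [innColN, this, if_pos (List.mem_range.2 hc)]

lemma colGet_innColS {g : List (List String)} {w c : Nat} (hg : RectW g w) (hc : c < w)
    (r : Nat) : colGet c (innColS w r g) = bstep r (colGet c g) := by
  have aux : ∀ (L : List Nat), L.Nodup →
      ∀ g, RectW g w → colGet c (L.foldl (fun g c' => stepSn r c' g) g) =
        if c ∈ L then bstep r (colGet c g) else colGet c g := by
    intro L
    induction L with
    | nil => intro _ g _; simp
    | cons a L ih =>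
      intro hnd g hg
      have hnd' : L.Nodup := (List.nodup_cons.1 hnd).2
      have hna : a ∉ L := (List.nodup_cons.1 hnd).1
      simp only [List.foldl_cons]
      rw [ih hnd' _ (rect_stepSn hg r a)]
      by_cases hac : a = c
      · subst hac
        rw [if_neg (by simpa using hna), colGet_stepSn_self hg hc, if_pos (by simp)]
      · rw [colGet_stepSn_ne hac]
        by_cases hcl : c ∈ L
        · rw [if_pos hcl, if_pos (by simp [hcl])]
        · rw [if_neg hcl, if_neg (by simp [hcl, Ne.symm hac])]
  have := aux (List.range w) (List.nodup_range) g hg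
  rw [innColS, this, if_pos (List.mem_range.2 hc)]

lemma rect_innColN {g : List (List String)} {w : Nat} (hg : RectW g w) (r : Nat) :
    RectW (innColN w r g) w :=
  foldl_preserve (fun g => RectW g w) _ (fun g c hgg => rect_stepNn hgg r c) _ g hg

lemma rect_innColS {g : List (List String)} {w : Nat} (hg : RectW g w) (r : Nat) :
    RectW (innColS w r g) w :=
  foldl_preserve (fun g => RectW g w) _ (fun g c hgg => rect_stepSn hgg r c) _ g hg

lemma rect_passN {g : List (List String)} {w : Nat} (hg : RectW g w) (last : Nat) :
    RectW (passN w last g) w :=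
  foldl_preserve (fun g => RectW g w) _ (fun g r hgg => rect_innColN hgg r) _ g hg

lemma rect_passS {g : List (List String)} {w n1 : Nat} (hg : RectW g w) (last : Nat) :
    RectW (passS w n1 last g) w :=
  foldl_preserve (fun g => RectW g w) _ (fun g k hgg => rect_innColS hgg (n1 - k)) _ g hg

lemma length_innColN (w r : Nat) (g : List (List String)) :
    (innColN w r g).length = g.length :=
  foldl_preserve (fun g' : List (List String) => g'.length = g.length) _
    (fun a b ha => by simpa [length_stepNn] using ha) _ _ rfl

lemma length_innColS (w r : Nat) (g : List (List String)) :
    (innColS w r g).length = g.length :=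
  foldl_preserve (fun g' : List (List String) => g'.length = g.length) _
    (fun a b ha => by simpa [length_stepSn] using ha) _ _ rfl

lemma length_passN (w last : Nat) (g : List (List String)) :
    (passN w last g).length = g.length :=
  foldl_preserve (fun g' : List (List String) => g'.length = g.length) _
    (fun a b ha => by simpa [length_innColN] using ha) _ _ rfl

lemma length_passS (w n1 last : Nat) (g : List (List String)) :
    (passS w n1 last g).length = g.length :=
  foldl_preserve (fun g' : List (List String) => g'.length = g.length) _
    (fun a b ha => by simpa [length_innColS] using ha) _ _ rfl

lemma length_schedN (w n1 : Nat) (g : List (List String)) :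
    (schedN w n1 g).length = g.length :=
  foldl_preserve (fun g' : List (List String) => g'.length = g.length) _
    (fun a b ha => by simpa [length_passN] using ha) _ _ rfl

lemma length_schedS (w n1 : Nat) (g : List (List String)) :
    (schedS w n1 g).length = g.length :=
  foldl_preserve (fun g' : List (List String) => g'.length = g.length) _
    (fun a b ha => by simpa [length_passS] using ha) _ _ rfl

lemma rect_schedN {g : List (List String)} {w : Nat} (hg : RectW g w) (n1 : Nat) :
    RectW (schedN w n1 g) w :=
  foldl_preserve (fun g => RectW g w) _ (fun g k hgg => rect_passN hgg _) _ g hg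

lemma rect_schedS {g : List (List String)} {w n1 : Nat} (hg : RectW g w) :
    RectW (schedS w n1 g) w :=
  foldl_preserve (fun g => RectW g w) _ (fun g k hgg => rect_passS hgg _) _ g hg

lemma colGet_passN {g : List (List String)} {w c : Nat} (hg : RectW g w) (hc : c < w)
    (last : Nat) : colGet c (passN w last g) = passRec last (colGet c g) := by
  induction last with
  | zero => simp [passN, passRec]
  | succ last ih =>
    rw [passN, List.range_succ, List.foldl_append]
    have hpn : (List.range last).foldl (fun g r => innColN w r g) g = passN w last g := rfl
    rw [hpn]
    simp only [List.foldl_cons, List.foldl_nil]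
    rw [colGet_innColN (rect_passN hg last) hc, ih, passRec_succ_right]

lemma colGet_passS {g : List (List String)} {w n1 c : Nat} (hg : RectW g w) (hc : c < w)
    (hn1 : n1 = g.length - 1) (hn : 1 ≤ g.length) (last : Nat) :
    colGet c (passS w n1 last g) = (passRec (n1 - last) (colGet c g).reverse).reverse := by
  have hlen : ∀ (L : List Nat) (g' : List (List String)), RectW g' w →
      colGet c (L.foldl (fun g k => innColS w (n1 - k) g) g')
        = L.foldl (fun l k => bstep (n1 - k) l) (colGet c g') := by
    intro L
    induction L with
    | nil => intro g' _; rfl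
    | cons a L ih =>
      intro g' hg'
      simp only [List.foldl_cons]
      rw [ih _ (rect_innColS hg' _), colGet_innColS hg' hc]
  rw [passS, hlen _ g hg]
  rw [foldl_congr_mem' (List.range (n1 - last)) (fun l k => bstep (n1 - k) l)
    (fun l k => bstep (g.length - 1 - k) l)
    (by
      intro k hk acc
      have := List.mem_range.1 hk
      have e : n1 - k = g.length - 1 - k := by omega
      dsimp only
      rw [e])]
  rw [cfold g.length (List.range (n1 - last)) (colGet c g) (by rw [length_colGet]) (by
    intro k hk
    have h5 := List.mem_range.1 hk
    subst hn1
    omega)]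
  rw [foldl_step1_range]

lemma colGet_schedS {g : List (List String)} {w c n1 : Nat} (hg : RectW g w) (hc : c < w)
    (hn1 : n1 = g.length - 1) (hn : 1 ≤ g.length) :
    colGet c (schedS w n1 g) = (foldSched n1 (colGet c g).reverse).reverse := by
  have aux : ∀ (L : List Nat) (g' : List (List String)), RectW g' w → g'.length = g.length →
      colGet c (L.foldl (fun g last => passS w n1 last g) g')
        = L.foldl (fun l last => (passRec (n1 - last) l.reverse).reverse) (colGet c g') := by
    intro L
    induction L with
    | nil => intro g' _ _; rfl
    | cons a L ih =>
      intro g' hg' hl'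
      simp only [List.foldl_cons]
      rw [ih _ (rect_passS hg' _) (by rw [length_passS]; exact hl'),
        colGet_passS hg' hc (by rw [hl']; exact hn1) (by omega) a]
  rw [schedS, aux _ g hg rfl, fsAsc]

lemma colGet_schedN {g : List (List String)} {w c : Nat} (hg : RectW g w) (hc : c < w)
    (n1 : Nat) : colGet c (schedN w n1 g) = foldSched n1 (colGet c g) := by
  induction n1 generalizing g with
  | zero => simp [schedN, foldSched]
  | succ n1 ih =>
    rw [schedN, List.range_succ_eq_map]
    simp only [List.foldl_cons, Nat.sub_zero, List.foldl_map]
    rw [foldl_congr_mem' _ _ (fun g k => passN w (n1 - k) g)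
      (by intro x _ acc; congr 1; omega)]
    have : (List.range n1).foldl (fun g k => passN w (n1 - k) g) (passN w (n1 + 1) g)
        = schedN w n1 (passN w (n1 + 1) g) := rfl
    rw [this, ih (rect_passN hg _), colGet_passN hg hc]
    rfl


-- ---------- rows layer (W and E act row by row) ----------

lemma length_stepWn (r c : Nat) (g : List (List String)) :
    (stepWn r c g).length = g.length := by
  rw [stepWn]; split <;> simp [length_setCellN]

lemma getD_oor (g : List (List String)) (r : Nat) (hr : ¬ r < g.length) :
    g.getD r [] = [] := by
  rw [List.getD_eq_getElem?_getD, List.getElem?_eq_none (by omega)]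
  rfl

lemma stepWn_set_form (r c : Nat) (g : List (List String)) :
    stepWn r c g = g.set r (step1 c (g.getD r [])) := by
  by_cases hr : r < g.length
  · rw [stepWn, step1]
    by_cases hA : (g.getD r []).getD c "" = "." ∧ (g.getD r []).getD (c + 1) "" = "O"
    · rw [if_pos hA, if_pos hA, setCellN, setCellN, getD_set_self]
      simp only [hr, if_pos, List.set_set]
    · rw [if_neg hA, if_neg hA, set_getD_self]
  · have hrow : g.getD r [] = [] := getD_oor g r hr
    rw [stepWn, hrow, if_neg (by simp), step1_nil, set_oor g r [] (by omega)]

lemma stepEn_set_form (r c : Nat) (g : List (List String)) :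
    stepEn r c g = g.set r (bstep c (g.getD r [])) := by
  by_cases hr : r < g.length
  · rw [stepEn, bstep]
    by_cases hA : (g.getD r []).getD (c - 1) "" = "O" ∧ (g.getD r []).getD c "" = "."
    · rw [if_pos hA, if_pos hA, setCellN, setCellN, getD_set_self]
      simp only [hr, if_pos, List.set_set]
    · rw [if_neg hA, if_neg hA, set_getD_self]
  · have hrow : g.getD r [] = [] := getD_oor g r hr
    have hb : bstep c ([] : List String) = [] := by simp [bstep]
    rw [stepEn, hrow, if_neg (by simp), hb, set_oor g r [] (by omega)]

lemma foldl_set_shift (f : List String → List String) (L : List Nat) (z : List String) :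
    ∀ (g : List (List String)),
      L.foldl (fun g r => g.set (r + 1) (f (g.getD (r + 1) []))) (z :: g)
        = z :: L.foldl (fun g r => g.set r (f (g.getD r []))) g := by
  induction L with
  | nil => intro g; rfl
  | cons a L ih =>
    intro g
    simp only [List.foldl_cons, List.getD_cons_succ]
    rw [show (z :: g).set (a + 1) (f (g.getD a [])) = z :: g.set a (f (g.getD a [])) from rfl,
      ih]

lemma foldl_set_map (f : List String → List String) :
    ∀ (g : List (List String)),
      (List.range g.length).foldl (fun g r => g.set r (f (g.getD r []))) g = g.map f := by
  intro g
  induction g with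
  | nil => rfl
  | cons x g ih =>
    rw [List.length_cons, List.range_succ_eq_map]
    simp only [List.foldl_cons, List.foldl_map, List.getD_cons_zero]
    rw [show (x :: g).set 0 (f x) = f x :: g from rfl, foldl_set_shift, ih, List.map_cons]

lemma innRowW_map (n c : Nat) (g : List (List String)) (h : g.length = n) :
    innRowW n c g = g.map (step1 c) := by
  rw [innRowW,
    foldl_congr_mem' (List.range n) (fun g r => stepWn r c g)
      (fun g r => g.set r (step1 c (g.getD r [])))
      (fun r _ acc => stepWn_set_form r c acc)]
  subst h
  exact foldl_set_map (step1 c) g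

lemma innRowE_map (n c : Nat) (g : List (List String)) (h : g.length = n) :
    innRowE n c g = g.map (bstep c) := by
  rw [innRowE,
    foldl_congr_mem' (List.range n) (fun g r => stepEn r c g)
      (fun g r => g.set r (bstep c (g.getD r [])))
      (fun r _ acc => stepEn_set_form r c acc)]
  subst h
  exact foldl_set_map (bstep c) g

lemma passW_map (n last : Nat) (g : List (List String)) (h : g.length = n) :
    passW n last g = g.map (passRec last) := by
  have aux : ∀ (L : List Nat) (g : List (List String)), g.length = n →
      L.foldl (fun g c => innRowW n c g) g
        = g.map (fun row => L.foldl (fun row c => step1 c row) row) := by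
    intro L
    induction L with
    | nil => intro g _; simp
    | cons a L ih =>
      intro g hgl
      simp only [List.foldl_cons]
      rw [innRowW_map n a g hgl, ih _ (by simp [hgl]), List.map_map]
      rfl
  rw [passW, aux _ g h]
  apply List.map_congr_left
  intro row _
  exact foldl_step1_range last row

lemma length_innRowW (n c : Nat) (g : List (List String)) :
    (innRowW n c g).length = g.length :=
  foldl_preserve (fun g' : List (List String) => g'.length = g.length) _
    (fun a b ha => by simpa [length_stepWn] using ha) _ _ rfl

lemma length_passW (n last : Nat) (g : List (List String)) :
    (passW n last g).length = g.length :=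
  foldl_preserve (fun g' : List (List String) => g'.length = g.length) _
    (fun a b ha => by simpa [length_innRowW] using ha) _ _ rfl

lemma schedW_map (n w1 : Nat) : ∀ (g : List (List String)), g.length = n →
    schedW n w1 g = g.map (foldSched w1) := by
  induction w1 with
  | zero =>
    intro g _
    simp [schedW, foldSched]
  | succ w1 ih =>
    intro g hgl
    rw [schedW, List.range_succ_eq_map]
    simp only [List.foldl_cons, Nat.sub_zero, List.foldl_map]
    rw [foldl_congr_mem' _ _ (fun g k => passW n (w1 - k) g)
      (by intro x _ acc; congr 1; omega)]
    have hstep : (List.range w1).foldl (fun g k => passW n (w1 - k) g) (passW n (w1 + 1) g)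
        = schedW n w1 (passW n (w1 + 1) g) := rfl
    rw [hstep, ih _ (by rw [length_passW]; exact hgl), passW_map n (w1 + 1) g hgl,
      List.map_map]
    rfl

lemma rect_map_lenpres {g : List (List String)} {w : Nat} (hg : RectW g w)
    (f : List String → List String) (hf : ∀ l, (f l).length = l.length) :
    RectW (g.map f) w := by
  intro row hrow
  simp only [List.mem_map] at hrow
  obtain ⟨row0, h0, hEq⟩ := hrow
  rw [← hEq, hf]
  exact hg _ h0

lemma passE_map (n w last : Nat) (g : List (List String)) (hg : RectW g w)
    (h : g.length = n) (hw : 1 ≤ w) :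
    passE n (w - 1) last g
      = g.map (fun row => (passRec (w - 1 - last) row.reverse).reverse) := by
  have aux : ∀ (L : List Nat) (g : List (List String)), g.length = n →
      L.foldl (fun g k => innRowE n (w - 1 - k) g) g
        = g.map (fun row => L.foldl (fun row k => bstep (w - 1 - k) row) row) := by
    intro L
    induction L with
    | nil => intro g _; simp
    | cons a L ih =>
      intro g hgl
      simp only [List.foldl_cons]
      rw [innRowE_map n _ g hgl, ih _ (by simp [hgl]), List.map_map]
      rfl
  rw [passE, aux _ g h]
  apply List.map_congr_left
  intro row hrow
  have hrl : row.length = w := hg row hrow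
  rw [cfold w (List.range (w - 1 - last)) row hrl (by
    intro k hk
    have := List.mem_range.1 hk
    omega)]
  rw [foldl_step1_range]

lemma schedE_map (n w : Nat) (g : List (List String)) (hg : RectW g w)
    (h : g.length = n) (hw : 1 ≤ w) :
    schedE n (w - 1) g = g.map (fun row => (foldSched (w - 1) row.reverse).reverse) := by
  have aux : ∀ (L : List Nat) (g' : List (List String)), RectW g' w → g'.length = n →
      L.foldl (fun g last => passE n (w - 1) last g) g'
        = g'.map (fun row => L.foldl
            (fun row last => (passRec (w - 1 - last) row.reverse).reverse) row) := by
    intro L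
    induction L with
    | nil => intro g' _ _; simp
    | cons a L ih =>
      intro g' hg' hl'
      simp only [List.foldl_cons]
      rw [passE_map n w a g' hg' hl' hw,
        ih _ (rect_map_lenpres hg' _ (by intro l; simp [length_passRec]))
          (by simp [hl']), List.map_map]
      rfl
  rw [schedE, aux _ g hg h]
  apply List.map_congr_left
  intro row _
  exact fsAsc (w - 1) row

-- ---------- zip(*) on rectangular grids ----------

lemma pyMinLen_rect (g : List (List String)) (w : Nat) (hg : RectW g w) (hne : g ≠ []) :
    pyMinLen g = w := by
  match g, hne with
  | x :: xs, _ =>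
    have hx : x.length = w := hg x (by simp)
    have aux : ∀ (L : List (List String)), (∀ l ∈ L, l.length = w) →
        L.foldl (fun m l => min m l.length) w = w := by
      intro L
      induction L with
      | nil => intro _; rfl
      | cons y L ih =>
        intro hL
        simp only [List.foldl_cons]
        rw [hL y (by simp), min_self]
        exact ih (fun l hl => hL l (by simp [hl]))
    rw [pyMinLen, hx]
    exact aux xs (fun l hl => hg l (by simp [hl]))

lemma pyZipStar_rect (g : List (List String)) (w : Nat) (hg : RectW g w) (hne : g ≠ []) :
    pyZipStar g = (List.range w).map (fun c => colGet c g) := by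
  rw [pyZipStar, pyMinLen_rect g w hg hne]
  rfl

-- ---------- trivial schedules when the grid has no columns ----------

lemma foldl_id {α β : Type} : ∀ (L : List β) (a : α), L.foldl (fun a _ => a) a = a := by
  intro L
  induction L with
  | nil => intro a; rfl
  | cons b L ih => intro a; exact ih a

lemma passN_zero_w (last : Nat) (g : List (List String)) : passN 0 last g = g := by
  rw [passN, foldl_congr_mem' (List.range last) (fun g r => innColN 0 r g)
    (fun g _ => g) (fun r _ acc => rfl)]
  exact foldl_id _ _

lemma schedN_zero_w (n1 : Nat) (g : List (List String)) : schedN 0 n1 g = g := by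
  rw [schedN, foldl_congr_mem' (List.range n1) (fun g k => passN 0 (n1 - k) g)
    (fun g _ => g) (fun k _ acc => passN_zero_w _ acc)]
  exact foldl_id _ _

lemma passS_zero_w (n1 last : Nat) (g : List (List String)) : passS 0 n1 last g = g := by
  rw [passS, foldl_congr_mem' (List.range (n1 - last)) (fun g k => innColS 0 (n1 - k) g)
    (fun g _ => g) (fun r _ acc => rfl)]
  exact foldl_id _ _

lemma schedS_zero_w (n1 : Nat) (g : List (List String)) : schedS 0 n1 g = g := by
  rw [schedS, foldl_congr_mem' (List.range n1) (fun g last => passS 0 n1 last g)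
    (fun g _ => g) (fun k _ acc => passS_zero_w _ _ acc)]
  exact foldl_id _ _

-- ---------- converting port A's Int loops to the Nat-level schedules ----------

lemma roll_rocks_N (data : List (List String)) :
    roll_rocks data "N" = schedN (data.headD []).length (data.length - 1) data := by
  simp only [roll_rocks, String.reduceEq, reduceIte]
  simp only [List.headD_eq_head?]
  by_cases h0 : data.length = 0
  · rw [PySem.List.pyRange_neg_one_eq_nil (by omega)]
    simp [schedN, h0]
  · have h1 : ((data.length : Int) - 1) = ((data.length - 1 : Nat) : Int) := by omega
    rw [h1,
      foldl_pyRange_desc0 (data.length - 1) _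
        (fun rv m => passN (data.head?.getD []).length m rv)
        (fun rv m _ _ => by
          rw [foldl_pyRange_asc m _ (fun rv r => innColN (data.head?.getD []).length r rv)
            (fun rv k _ => by
              rw [foldl_pyRange_asc ((data.head?.getD []).length) _
                (fun rv c => stepNn k c rv) (fun rv c _ => stepN_nat rv k c) rv]
              rfl)
            rv]
          rfl)
        data]
    rfl

lemma roll_rocks_W (data : List (List String)) :
    roll_rocks data "W" = schedW data.length ((data.headD []).length - 1) data := by
  simp only [roll_rocks, String.reduceEq, reduceIte]
  simp only [List.headD_eq_head?]
  by_cases h0 : (data.head?.getD ([] : List String)).length = 0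
  · rw [PySem.List.pyRange_neg_one_eq_nil (by omega)]
    simp [schedW, h0]
  · have h1 : (((data.head?.getD ([] : List String)).length : Int) - 1)
        = (((data.head?.getD ([] : List String)).length - 1 : Nat) : Int) := by omega
    rw [h1,
      foldl_pyRange_desc0 ((data.head?.getD []).length - 1) _
        (fun rv m => passW data.length m rv)
        (fun rv m _ _ => by
          rw [foldl_pyRange_asc m _ (fun rv c => innRowW data.length c rv)
            (fun rv k _ => by
              rw [foldl_pyRange_asc data.length _
                (fun rv r => stepWn r k rv) (fun rv r _ => stepW_nat rv r k) rv]
              rfl)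
            rv]
          rfl)
        data]
    rfl

lemma roll_rocks_S (data : List (List String)) :
    roll_rocks data "S" = schedS (data.headD []).length (data.length - 1) data := by
  simp only [roll_rocks, String.reduceEq, reduceIte]
  simp only [List.headD_eq_head?]
  by_cases h0 : data.length = 0
  · rw [show PySem.List.pyRange 0 ((data.length : Int) - 1) 1 = []
      from PySem.List.pyRange_one_eq_nil (by omega)]
    simp [schedS, h0]
  · have h1 : ((data.length : Int) - 1) = ((data.length - 1 : Nat) : Int) := by omega
    rw [h1,
      foldl_pyRange_asc (data.length - 1) _
        (fun rv last => passS (data.head?.getD []).length (data.length - 1) last rv)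
        (fun rv L hL => by
          rw [foldl_pyRange_desc (data.length - 1) L _
            (fun rv r => innColS (data.head?.getD []).length r rv)
            (fun rv m hm _ => by
              rw [foldl_pyRange_asc ((data.head?.getD []).length) _
                (fun rv c => stepSn m c rv)
                (fun rv c _ => stepS_nat rv m c (by omega)) rv]
              rfl)
            rv]
          rfl)
        data]
    rfl

lemma roll_rocks_E (data : List (List String)) :
    roll_rocks data "E" = schedE data.length ((data.headD []).length - 1) data := by
  simp only [roll_rocks, String.reduceEq, reduceIte]
  simp only [List.headD_eq_head?]
  by_cases h0 : (data.head?.getD ([] : List String)).length = 0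
  · rw [show PySem.List.pyRange 0 (((data.head?.getD ([] : List String)).length : Int) - 1) 1 = []
      from PySem.List.pyRange_one_eq_nil (by omega)]
    simp [schedE, h0]
  · have h1 : (((data.head?.getD ([] : List String)).length : Int) - 1)
        = (((data.head?.getD ([] : List String)).length - 1 : Nat) : Int) := by omega
    rw [h1,
      foldl_pyRange_asc ((data.head?.getD []).length - 1) _
        (fun rv last => passE data.length ((data.head?.getD []).length - 1) last rv)
        (fun rv L hL => by
          rw [foldl_pyRange_desc ((data.head?.getD []).length - 1) L _
            (fun rv c => innRowE data.length c rv)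
            (fun rv m hm _ => by
              rw [foldl_pyRange_asc data.length _
                (fun rv r => stepEn r m rv)
                (fun rv r _ => stepE_nat rv r m (by omega)) rv]
              rfl)
            rv]
          rfl)
        data]
    rfl

lemma roll_rocks_other (data : List (List String)) (direction : String)
    (hN : direction ≠ "N") (hS : direction ≠ "S") (hW : direction ≠ "W")
    (hE : direction ≠ "E") : roll_rocks data direction = data := by
  simp only [roll_rocks, if_neg hN, if_neg hS, if_neg hW, if_neg hE]

-- ---------- per-direction equivalence ----------

lemma branchW (data : List (List String)) (w0 : Nat) (hg : RectW data w0) :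
    schedW data.length (w0 - 1) data = data.map compactB := by
  rw [schedW_map data.length (w0 - 1) data rfl]
  apply List.map_congr_left
  intro row hrow
  rw [Tmain row.length row le_rfl (w0 - 1) (by have := hg row hrow; omega), compactB_eq]

lemma branchE (data : List (List String)) (w0 : Nat) (hg : RectW data w0) :
    schedE data.length (w0 - 1) data
      = data.map (fun row => (compactB row.reverse).reverse) := by
  by_cases hw : w0 = 0
  · subst hw
    have h1 : schedE data.length 0 data = data := rfl
    rw [show (0 : Nat) - 1 = 0 from rfl, h1]
    have h2 : ∀ row ∈ data, (compactB row.reverse).reverse = row := by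
      intro row hrow
      have : row = [] := List.eq_nil_of_length_eq_zero (hg row hrow)
      subst this
      rfl
    exact ((List.map_congr_left h2).trans (List.map_id _)).symm
  · rw [schedE_map data.length w0 data hg rfl (by omega)]
    apply List.map_congr_left
    intro row hrow
    rw [Tmain row.reverse.length row.reverse le_rfl (w0 - 1)
      (by have := hg row hrow; simp at this ⊢; omega), compactB_eq]

lemma branchN (data : List (List String)) (w0 : Nat) (hg : RectW data w0)
    (hn : data ≠ []) (hw : 1 ≤ w0) :
    schedN w0 (data.length - 1) data = pyZipStar ((pyZipStar data).map compactB) := by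
  have hnn : 0 < data.length := List.length_pos_iff.2 hn
  have hz2 : (pyZipStar data).map compactB
      = (List.range w0).map (fun c => compactR (colGet c data)) := by
    rw [pyZipStar_rect data w0 hg hn, List.map_map]
    apply List.map_congr_left
    intro c _
    exact compactB_eq _
  have hrect2 : RectW ((List.range w0).map fun c => compactR (colGet c data)) data.length := by
    intro col hcol
    simp only [List.mem_map] at hcol
    obtain ⟨c, _, hEq⟩ := hcol
    rw [← hEq, length_compactR, length_colGet]
  have hne2 : ((List.range w0).map fun c => compactR (colGet c data)) ≠ [] := by
    intro hcon
    have := congrArg List.length hcon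
    simp at this
    omega
  rw [hz2, pyZipStar_rect _ data.length hrect2 hne2]
  apply List.ext_getElem
  · rw [length_schedN]
    simp
  · intro r h1 h2
    apply List.ext_getElem
    · have hmem : (schedN w0 (data.length - 1) data)[r] ∈ schedN w0 (data.length - 1) data :=
        List.getElem_mem h1
      rw [rect_schedN hg _ _ hmem]
      simp [colGet]
    · intro c hc1 hc2
      have hcw : c < w0 := by
        have hmem : (schedN w0 (data.length - 1) data)[r] ∈ _ := List.getElem_mem h1
        have := rect_schedN hg (data.length - 1) _ hmem
        omega
      have hrn : r < data.length := by
        rw [length_schedN] at h1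
        exact h1
      have hcol : colGet c (schedN w0 (data.length - 1) data) = compactR (colGet c data) := by
        rw [colGet_schedN hg hcw (data.length - 1),
          Tmain (colGet c data).length _ le_rfl _ (by rw [length_colGet]; omega)]
      have e1 : ((schedN w0 (data.length - 1) data).getD r []).getD c ""
          = (compactR (colGet c data)).getD r "" := by
        rw [← colGet_getD, hcol]
      rw [List.getD_eq_getElem _ [] h1] at e1
      rw [List.getD_eq_getElem _ "" hc1] at e1
      rw [List.getD_eq_getElem _ ""
        (by rw [length_compactR, length_colGet]; exact hrn)] at e1
      rw [e1]
      simp only [List.getElem_map, List.getElem_range, colGet]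
      rw [List.getD_eq_getElem _ "" (by simpa [length_compactR, length_colGet] using hrn)]

lemma branchS (data : List (List String)) (w0 : Nat) (hg : RectW data w0)
    (hn : data ≠ []) (hw : 1 ≤ w0) :
    schedS w0 (data.length - 1) data
      = pyZipStar ((pyZipStar data).map (fun c => (compactB c.reverse).reverse)) := by
  have hnn : 0 < data.length := List.length_pos_iff.2 hn
  have hz2 : (pyZipStar data).map (fun c => (compactB c.reverse).reverse)
      = (List.range w0).map (fun c => (compactR (colGet c data).reverse).reverse) := by
    rw [pyZipStar_rect data w0 hg hn, List.map_map]
    apply List.map_congr_left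
    intro c _
    show (compactB (colGet c data).reverse).reverse = _
    rw [compactB_eq]
  have hrect2 : RectW ((List.range w0).map
      fun c => (compactR (colGet c data).reverse).reverse) data.length := by
    intro col hcol
    simp only [List.mem_map] at hcol
    obtain ⟨c, _, hEq⟩ := hcol
    rw [← hEq]
    simp [length_compactR, length_colGet]
  have hne2 : ((List.range w0).map
      fun c => (compactR (colGet c data).reverse).reverse) ≠ [] := by
    intro hcon
    have := congrArg List.length hcon
    simp at this
    omega
  rw [hz2, pyZipStar_rect _ data.length hrect2 hne2]
  apply List.ext_getElem
  · rw [length_schedS]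
    simp
  · intro r h1 h2
    apply List.ext_getElem
    · have hmem : (schedS w0 (data.length - 1) data)[r] ∈ schedS w0 (data.length - 1) data :=
        List.getElem_mem h1
      rw [rect_schedS hg _ hmem]
      simp [colGet]
    · intro c hc1 hc2
      have hcw : c < w0 := by
        have hmem : (schedS w0 (data.length - 1) data)[r] ∈ _ := List.getElem_mem h1
        have := rect_schedS hg _ hmem
        omega
      have hrn : r < data.length := by
        rw [length_schedS] at h1
        exact h1
      have hcol : colGet c (schedS w0 (data.length - 1) data)
          = (compactR (colGet c data).reverse).reverse := by
        rw [colGet_schedS hg hcw rfl (by omega),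
          Tmain (colGet c data).reverse.length _ le_rfl _
            (by rw [List.length_reverse, length_colGet]; omega)]
      have e1 : ((schedS w0 (data.length - 1) data).getD r []).getD c ""
          = ((compactR (colGet c data).reverse).reverse).getD r "" := by
        rw [← colGet_getD, hcol]
      rw [List.getD_eq_getElem _ [] h1] at e1
      rw [List.getD_eq_getElem _ "" hc1] at e1
      rw [List.getD_eq_getElem _ ""
        (by simp only [List.length_reverse, length_compactR, length_colGet]; exact hrn)] at e1
      rw [e1]
      simp only [List.getElem_map, List.getElem_range, colGet]
      rw [List.getD_eq_getElem _ "" (by simpa [length_compactR, length_colGet] using hrn)]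

-- ===== VERDICT (by name: the statement is the Claim_ definition above) =====
theorem roll_rocks_spec : Claim_equal_roll_rocks := by
  intro data direction _hdom hpre
  obtain ⟨hNS, hWE⟩ := hpre
  unfold Spec_roll_rocks
  by_cases hN : direction = "N"
  · subst hN
    rw [roll_rocks_N]
    unfold roll_rocks_alt
    rw [if_neg (by decide : ¬ ("N" : String) = "W"),
      if_neg (by decide : ¬ ("N" : String) = "E"),
      if_pos (Or.inl rfl : ("N" : String) = "N" ∨ ("N" : String) = "S")]
    by_cases hguard : data = [] ∨ data.headD [] = []
    · rw [if_pos hguard]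
      rcases hguard with h | h
      · subst h
        rfl
      · have hw0 : (data.headD []).length = 0 := by rw [h]; rfl
        rw [hw0]
        exact schedN_zero_w _ _
    · rw [if_neg hguard]
      have h1 : data ≠ [] := fun h => hguard (Or.inl h)
      have h2 : data.headD [] ≠ [] := fun h => hguard (Or.inr h)
      have hg : RectW data (data.headD []).length := by
        rcases hNS (Or.inl rfl) with h | h
        · exact absurd h h2
        · exact h
      have hw : 1 ≤ (data.headD []).length := by
        cases hh : data.headD [] with
        | nil => exact absurd hh h2
        | cons a t => simp
      simp only [String.reduceEq, reduceIte]
      exact branchN data _ hg h1 hw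
  · by_cases hS : direction = "S"
    · subst hS
      rw [roll_rocks_S]
      unfold roll_rocks_alt
      rw [if_neg (by decide : ¬ ("S" : String) = "W"),
        if_neg (by decide : ¬ ("S" : String) = "E"),
        if_pos (Or.inr rfl : ("S" : String) = "N" ∨ ("S" : String) = "S")]
      by_cases hguard : data = [] ∨ data.headD [] = []
      · rw [if_pos hguard]
        rcases hguard with h | h
        · subst h
          rfl
        · have hw0 : (data.headD []).length = 0 := by rw [h]; rfl
          rw [hw0]
          exact schedS_zero_w _ _
      · rw [if_neg hguard]
        have h1 : data ≠ [] := fun h => hguard (Or.inl h)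
        have h2 : data.headD [] ≠ [] := fun h => hguard (Or.inr h)
        have hg : RectW data (data.headD []).length := by
          rcases hNS (Or.inr rfl) with h | h
          · exact absurd h h2
          · exact h
        have hw : 1 ≤ (data.headD []).length := by
          cases hh : data.headD [] with
          | nil => exact absurd hh h2
          | cons a t => simp
        simp only [reduceIte]
        exact branchS data _ hg h1 hw
    · by_cases hW : direction = "W"
      · subst hW
        rw [roll_rocks_W]
        unfold roll_rocks_alt
        rw [if_pos rfl]
        exact branchW data _ (hWE (Or.inl rfl)).2
      · by_cases hE : direction = "E"
        · subst hE
          rw [roll_rocks_E]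
          unfold roll_rocks_alt
          rw [if_neg (by decide : ¬ ("E" : String) = "W"), if_pos rfl]
          exact branchE data _ (hWE (Or.inr rfl)).2
        · rw [roll_rocks_other data direction hN hS hW hE]
          unfold roll_rocks_alt
          rw [if_neg hW, if_neg hE, if_neg (by
            rintro (h | h)
            · exact hN h
            · exact hS h)]
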